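-- pv_equiv track=rewrite | github.com/rivit98/ctf-writeups | 2023/n1ctf/n1go/decoder.py | parse_get_byte_func
-- ===== SOURCE A (Python) =====
-- def parse_get_byte_func(func):
--     chunks = []
--     current = []
--     for line in func.splitlines():
--         if line.startswith('	case ') or line.startswith('	default:'):
--             chunks.append('\n'.join(current))
--             current = []
--
--         current.append(line)
--     chunks.append('\n'.join(current))
--
--     headers = chunks.pop(0)
--     if not chunks:
--         return headers, [], ""
--     last = chunks.pop(-1)
--     footer = last.split('}')
--     chunks.append(footer[0])
--     return headers, chunks, '}'.join(footer[1:])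
-- ===== SOURCE B (Python) =====
-- def parse_get_byte_func(func):
--     lines = func.splitlines()
--     marks = [i for i, l in enumerate(lines)
--              if l.startswith('\tcase ') or l.startswith('\tdefault:')]
--     bounds = [0] + marks + [len(lines)]
--     chunks = ['\n'.join(lines[a:b]) for a, b in zip(bounds, bounds[1:])]
--     headers, *rest = chunks
--     if not rest:
--         return headers, [], ""
--     *mid, last = rest
--     footer = last.split('}')
--     return headers, mid + [footer[0]], '}'.join(footer[1:])
-- ===== Notes on version B (the rewrite author's own statement) =====
-- stated objective: alternative
-- what changed: Replaces A's single flush-loop with mutable (chunks,current) accumulators by a two-phase decomposition: collect marker line indices first, then build each chunk by slicing the line list at consecutive boundary indices; the identical header/footer post-processing is kept.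
import Mathlib
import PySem

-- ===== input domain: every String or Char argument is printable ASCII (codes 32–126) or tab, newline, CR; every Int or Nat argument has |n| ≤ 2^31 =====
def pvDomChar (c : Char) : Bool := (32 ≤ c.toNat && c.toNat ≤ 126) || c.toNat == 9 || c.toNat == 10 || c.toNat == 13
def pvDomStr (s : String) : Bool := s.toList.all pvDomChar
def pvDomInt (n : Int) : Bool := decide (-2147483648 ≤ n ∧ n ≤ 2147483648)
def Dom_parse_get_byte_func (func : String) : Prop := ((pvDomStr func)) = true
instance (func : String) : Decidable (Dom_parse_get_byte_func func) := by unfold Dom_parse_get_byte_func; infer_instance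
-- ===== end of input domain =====

-- B replaces A's flush-loop accumulator with marker-index collection + boundary slicing (same cost; objective: alternative decomposition).

-- ===== PORT A =====
-- the marker test 'line.startswith("\tcase ") or line.startswith("\tdefault:")'
def pvMark (line : String) : Bool :=
  PySem.Str.startswith line "\tcase " || PySem.Str.startswith line "\tdefault:"

-- one iteration of A's for-loop over (chunks, current)
def pvStepA (st : List String × List String) (line : String) : List String × List String :=
  let st := if pvMark line then (st.1 ++ [PySem.Str.join "\n" st.2], ([] : List String)) else st
  (st.1, st.2 ++ [line])

def parse_get_byte_func (func : String) : String × List String × String :=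
  let r := (PySem.Str.splitlines func).foldl pvStepA ([], [])
  let chunks := r.1 ++ [PySem.Str.join "\n" r.2]
  let headers := chunks.headD ""        -- chunks.pop(0): chunks is never empty here
  let chunks := chunks.tail
  if chunks = [] then (headers, [], "")
  else
    let last := chunks.getLastD ""      -- chunks.pop(-1): chunks is nonempty here
    let chunks := chunks.dropLast
    let footer := (PySem.Str.split? last "}").getD []   -- sep "}" ≠ "" so split? is some
    (headers, chunks ++ [footer.headD ""], PySem.Str.join "}" footer.tail)

-- ===== PORT B =====
def parse_get_byte_func_alt (func : String) : String × List String × String :=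
  let lines := PySem.Str.splitlines func
  let marks : List Int := (PySem.List.enumerate lines).filterMap
    (fun p => if pvMark p.2 then some p.1 else none)
  let bounds : List Int := 0 :: marks ++ [(lines.length : Int)]
  let chunks := (bounds.zip bounds.tail).map
    (fun p => PySem.Str.join "\n" (PySem.List.slice lines (some p.1) (some p.2)))
  match chunks with
  | [] => ("", [], "")                  -- unreachable: bounds has at least two entries
  | [headers] => (headers, [], "")
  | headers :: c :: cs =>
    let rest := c :: cs
    let footer := (PySem.Str.split? (rest.getLastD "") "}").getD []   -- last.split('}')
    (headers, rest.dropLast ++ [footer.headD ""], PySem.Str.join "}" footer.tail)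

-- ===== PRECONDITION & SPEC =====
def Spec_parse_get_byte_func (func : String) (out : String × List String × String) : Prop := out = parse_get_byte_func_alt func
instance (func : String) (out : String × List String × String) : Decidable (Spec_parse_get_byte_func func out) := by unfold Spec_parse_get_byte_func; infer_instance

-- ===== CLAIM (what is proved, stated in full; the proofs are below) =====
def Claim_equal_parse_get_byte_func : Prop := ∀ (func : String), Dom_parse_get_byte_func func → Spec_parse_get_byte_func func (parse_get_byte_func func)

-- ===== LEMMAS AND PROOFS =====

-- the list of line-groups both programs produce, as a structural recursion
def pvGroups : List String → List (List String)
  | [] => [[]]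
  | l :: ls =>
    match pvGroups ls with
    | [] => [[]]          -- unreachable
    | g :: gs => if pvMark l then [] :: (l :: g) :: gs else (l :: g) :: gs

-- marker indices of a line list, as naturals
def pvMarksN : List String → List Nat
  | [] => []
  | l :: ls => (if pvMark l then [0] else []) ++ (pvMarksN ls).map (· + 1)

def pvBounds (ls : List String) : List Nat := pvMarksN ls ++ [ls.length]

def pvPieces (ls : List String) : List (List String) :=
  ((0 :: pvBounds ls).zip (pvBounds ls)).map (fun p => (ls.drop p.1).take (p.2 - p.1))

theorem pvGroups_ne_nil (ls : List String) : pvGroups ls ≠ [] := by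
  cases ls with
  | nil => simp [pvGroups]
  | cons l ls =>
    cases h : pvGroups ls with
    | nil => simp [pvGroups, h]
    | cons g gs => simp only [pvGroups, h]; split <;> simp

-- A's loop: running the fold from (cs, cur) and flushing yields cs ++ joined groups with cur prepended to the first group
theorem pvFoldA (ls : List String) : ∀ (cs : List String) (cur : List String),
    ((ls.foldl pvStepA (cs, cur)).1 ++ [PySem.Str.join "\n" (ls.foldl pvStepA (cs, cur)).2])
      = cs ++ ((cur ++ (pvGroups ls).headD []) :: (pvGroups ls).tail).map (PySem.Str.join "\n") := by
  induction ls with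
  | nil => intro cs cur; simp [pvGroups]
  | cons l ls ih =>
    intro cs cur
    obtain ⟨g, gs, hg⟩ := List.exists_cons_of_ne_nil (pvGroups_ne_nil ls)
    by_cases h : pvMark l = true
    · simp only [List.foldl_cons, pvStepA, h, if_pos, ih, pvGroups, hg]
      simp
    · simp only [List.foldl_cons, pvStepA, h, ih, pvGroups, hg]
      simp

theorem pvMarksInt (ls : List String) : ∀ (s : Int),
    (PySem.List.enumerate ls s).filterMap (fun p => if pvMark p.2 then some p.1 else none)
      = (pvMarksN ls).map (fun (k : Nat) => s + (k : Int)) := by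
  induction ls with
  | nil => intro s; simp [pvMarksN, PySem.List.enumerate_nil]
  | cons l ls ih =>
    intro s
    have hmap : ∀ (m : List Nat), m.map (fun (k : Nat) => (s + 1) + (k : Int))
        = (m.map (· + 1)).map (fun (k : Nat) => s + (k : Int)) := by
      intro m
      rw [List.map_map]
      apply List.map_congr_left
      intro a _
      simp only [Function.comp]
      push_cast
      ring
    rw [PySem.List.enumerate_cons]
    by_cases h : pvMark l = true <;>
      simp [h, pvMarksN, ih (s + 1), hmap]

-- dropping a common +1 shift on both bound lists peels one line off the front
theorem pvShift (l : String) (ls : List String) (as bs : List Nat) :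
    ((as.map (· + 1)).zip (bs.map (· + 1))).map (fun p => ((l :: ls).drop p.1).take (p.2 - p.1))
      = (as.zip bs).map (fun p => (ls.drop p.1).take (p.2 - p.1)) := by
  rw [List.zip_map, List.map_map]
  apply List.map_congr_left
  intro p _
  simp [List.drop_succ_cons, Nat.succ_sub_succ]

theorem pvBounds_ne_nil (ls : List String) : pvBounds ls ≠ [] := by
  simp [pvBounds]

theorem pvPieces_shift (l : String) (ls : List String) :
    ((0 :: (pvBounds ls).map (· + 1)).zip ((pvBounds ls).map (· + 1))).map
        (fun p => ((l :: ls).drop p.1).take (p.2 - p.1))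
      = (l :: (pvPieces ls).headD []) :: (pvPieces ls).tail := by
  obtain ⟨b, bs', hb⟩ := List.exists_cons_of_ne_nil (pvBounds_ne_nil ls)
  have hs := pvShift l ls (b :: bs') bs'
  simp only [List.map_cons] at hs
  rw [hb]
  simp only [List.map_cons, List.zip_cons_cons, List.map_cons, hs]
  simp [pvPieces, hb]

theorem pvPieces_eq_groups (ls : List String) : pvPieces ls = pvGroups ls := by
  induction ls with
  | nil => simp [pvPieces, pvBounds, pvMarksN, pvGroups]
  | cons l ls ih =>
    obtain ⟨g, gs, hg⟩ := List.exists_cons_of_ne_nil (pvGroups_ne_nil ls)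
    have hph : ((0 :: (pvBounds ls).map (· + 1)).zip ((pvBounds ls).map (· + 1))).map
          (fun p => ((l :: ls).drop p.1).take (p.2 - p.1)) = (l :: g) :: gs := by
      rw [pvPieces_shift l ls, ih, hg]
      simp
    by_cases h : pvMark l = true
    · have hb : pvBounds (l :: ls) = 0 :: (pvBounds ls).map (· + 1) := by
        simp [pvBounds, pvMarksN, h, List.map_append]
      rw [pvPieces, hb]
      simp only [List.zip_cons_cons, List.map_cons, hph]
      simp [pvGroups, hg, h]
    · have hb : pvBounds (l :: ls) = (pvBounds ls).map (· + 1) := by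
        simp [pvBounds, pvMarksN, h, List.map_append]
      rw [pvPieces, hb, hph]
      simp [pvGroups, hg, h]

-- casting the Nat bound pairs to Int and slicing is taking/dropping
theorem pvZipCast (ls : List String) : ∀ (bs : List Nat) (as : List Nat),
    ((as.map (fun (k : Nat) => (k : Int))).zip (bs.map (fun (k : Nat) => (k : Int)))).map
        (fun p => PySem.Str.join "\n" (PySem.List.slice ls (some p.1) (some p.2)))
      = (as.zip bs).map (fun p => PySem.Str.join "\n" ((ls.drop p.1).take (p.2 - p.1))) := by
  intro bs
  induction bs with
  | nil => intro as; simp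
  | cons b bs ih =>
    intro as
    cases as with
    | nil => simp
    | cons a as => simp [ih, PySem.List.slice_natCast]

-- B's chunk list equals the joined groups
theorem pvChunksB (ls : List String) :
    ((((0 :: ((PySem.List.enumerate ls).filterMap (fun p => if pvMark p.2 then some p.1 else none))) ++ [(ls.length : Int)]).zip
        (((0 :: ((PySem.List.enumerate ls).filterMap (fun p => if pvMark p.2 then some p.1 else none))) ++ [(ls.length : Int)]).tail)).map
      (fun p => PySem.Str.join "\n" (PySem.List.slice ls (some p.1) (some p.2))))
      = (pvGroups ls).map (PySem.Str.join "\n") := by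
  have hm : (PySem.List.enumerate ls).filterMap (fun p => if pvMark p.2 then some p.1 else none)
      = (pvMarksN ls).map (fun (k : Nat) => (k : Int)) := by
    rw [pvMarksInt ls 0]
    simp
  rw [List.cons_append, List.tail_cons, hm]
  rw [show (0 : Int) :: ((pvMarksN ls).map (fun (k : Nat) => (k : Int)) ++ [(ls.length : Int)])
        = (0 :: pvBounds ls).map (fun (k : Nat) => (k : Int)) from by simp [pvBounds]]
  rw [show (pvMarksN ls).map (fun (k : Nat) => (k : Int)) ++ [(ls.length : Int)]
        = (pvBounds ls).map (fun (k : Nat) => (k : Int)) from by simp [pvBounds]]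
  rw [pvZipCast ls (pvBounds ls) (0 :: pvBounds ls)]
  rw [← pvPieces_eq_groups]
  simp [pvPieces, List.map_map, Function.comp_def]

-- ===== VERDICT (by name: the statement is the Claim_ definition above) =====
theorem parse_get_byte_func_spec : Claim_equal_parse_get_byte_func := by
  intro func _
  unfold Spec_parse_get_byte_func parse_get_byte_func parse_get_byte_func_alt
  have hA := pvFoldA (PySem.Str.splitlines func) [] []
  have hB := pvChunksB (PySem.Str.splitlines func)
  set ls := PySem.Str.splitlines func with hls
  obtain ⟨g, gs, hg⟩ := List.exists_cons_of_ne_nil (pvGroups_ne_nil ls)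
  simp only [hg, List.headD_cons, List.tail_cons, List.nil_append] at hA
  simp only [hg, List.map_cons] at hB
  simp only [hA]
  rw [hB]
  cases gs with
  | nil => simp
  | cons c cs => simp
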